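-- pv_equiv track=rewrite | github.com/cruzher/autodash | scheduler.py | _parse_day_spec
-- ===== SOURCE A (Python) =====
-- _DAY_NAMES = ["Mon", "Tue", "Wed", "Thu", "Fri", "Sat", "Sun"]
--
-- def _parse_day_spec(spec: str) -> set:
--     spec = spec.strip()
--     if spec == "*":
--         return set(range(7))
--     result = set()
--     for part in spec.split(","):
--         part = part.strip()
--         if "-" in part:
--             a, _, b = part.partition("-")
--             try:
--                 start_idx = _DAY_NAMES.index(a.strip())
--                 end_idx   = _DAY_NAMES.index(b.strip())
--             except ValueError:
--                 raise ValueError(f"Unknown day name in schedule: {part!r}")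
--             if start_idx <= end_idx:
--                 result.update(range(start_idx, end_idx + 1))
--             else:
--                 result.update(range(start_idx, 7))
--                 result.update(range(0, end_idx + 1))
--         else:
--             try:
--                 result.add(_DAY_NAMES.index(part))
--             except ValueError:
--                 raise ValueError(f"Unknown day name in schedule: {part!r}")
--     return result
-- ===== SOURCE B (Python) =====
-- _DAY_NAMES = ["Mon", "Tue", "Wed", "Thu", "Fri", "Sat", "Sun"]
--
-- def _parse_day_spec(spec: str) -> set:
--     spec = spec.strip()
--     if spec == "*":
--         return _cycle(0, 6, set())
--     return _parts(spec.split(","), set())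
--
-- def _parts(parts, acc):
--     if not parts:
--         return acc
--     part = parts[0].strip()
--     if "-" in part:
--         a, _, b = part.partition("-")
--         _cycle(_lookup(a.strip(), part, 0), _lookup(b.strip(), part, 0), acc)
--     else:
--         acc.add(_lookup(part, part, 0))
--     return _parts(parts[1:], acc)
--
-- def _lookup(name, part, i):
--     if i == len(_DAY_NAMES):
--         raise ValueError(f"Unknown day name in schedule: {part!r}")
--     if _DAY_NAMES[i] == name:
--         return i
--     return _lookup(name, part, i + 1)
--
-- def _cycle(s, e, acc):
--     acc.add(s)
--     if s != e:
--         return _cycle((s + 1) % 7, e, acc)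
--     return acc
-- ===== Notes on version B (the rewrite author's own statement) =====
-- stated objective: alternative
-- what changed: A's iterative loop with range()-set unions and try/except list.index is replaced by a fully recursive decomposition: structural recursion over the comma parts, a recursive linear-scan lookup that raises directly, and a recursive modular walk that expands a range one day at a time instead of A's two-branch forward/wraparound range() unions.
import Mathlib
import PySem

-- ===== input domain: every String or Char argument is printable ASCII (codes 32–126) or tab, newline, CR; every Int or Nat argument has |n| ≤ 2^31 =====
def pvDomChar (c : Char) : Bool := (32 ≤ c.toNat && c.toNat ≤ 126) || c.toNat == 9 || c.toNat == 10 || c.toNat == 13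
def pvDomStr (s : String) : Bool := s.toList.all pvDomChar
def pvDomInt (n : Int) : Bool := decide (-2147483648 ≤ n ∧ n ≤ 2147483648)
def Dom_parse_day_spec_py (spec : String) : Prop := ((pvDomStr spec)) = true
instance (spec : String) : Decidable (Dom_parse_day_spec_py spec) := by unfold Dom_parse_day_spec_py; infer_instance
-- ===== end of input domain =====

-- B is a fully recursive decomposition: recursion over the list of parts, a recursive
-- linear-scan day lookup that raises directly, and a recursive modular walk expanding a
-- range one day at a time (replacing A's two-branch range() unions). Objective: alternative.

-- ===== PORT A =====
def pvDayNames : List String := ["Mon", "Tue", "Wed", "Thu", "Fri", "Sat", "Sun"]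

-- one iteration of A's loop body; none = the ValueError raise (excluded by Pre_)
-- part.partition("-") ported by hand as takeWhile/dropWhile: exact for the 1-char separator "-"
def pvAPart (result : PySem.Set Int) (part0 : List Char) : Option (PySem.Set Int) :=
  let part := PySem.Chars.strip part0
  if PySem.Chars.isIn ['-'] part then
    let a := part.takeWhile (· != '-')
    let b := (part.dropWhile (· != '-')).drop 1
    match PySem.List.index? pvDayNames (String.ofList (PySem.Chars.strip a)),
          PySem.List.index? pvDayNames (String.ofList (PySem.Chars.strip b)) with
    | some s, some e =>
        if (s : Int) ≤ (e : Int) then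
          some (PySem.Set.update result (PySem.List.pyRange (s : Int) ((e : Int) + 1) 1))
        else
          some (PySem.Set.update (PySem.Set.update result (PySem.List.pyRange (s : Int) 7 1))
                  (PySem.List.pyRange 0 ((e : Int) + 1) 1))
    | _, _ => none
  else
    match PySem.List.index? pvDayNames (String.ofList part) with
    | some i => some (PySem.Set.add result (i : Int))
    | none => none

def parse_day_spec_py (spec : String) : List Int :=
  let t := PySem.Str.strip spec
  if t = "*" then PySem.Set.ofList (PySem.List.pyRange 0 7 1)
  else
    match (PySem.Chars.splitOn t.toList [',']).foldl
            (fun acc part => acc.bind (fun r => pvAPart r part)) (some PySem.Set.empty) with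
    | some r => r
    | none => []   -- Python A raises ValueError here; excluded by Pre_

-- ===== PORT B =====
-- _lookup: recursive scan; ported by recursion on the remaining names, carrying the index i
def pvLookup : List String → Nat → String → Option Nat
  | [], _, _ => none          -- Python B raises ValueError here; excluded by Pre_
  | n :: rest, i, name => if n = name then some i else pvLookup rest (i + 1) name

-- _cycle: recursive modular walk; fuel 7 only makes the recursion structural — with day
-- indices 0..6 the walk needs at most 7 steps, so the fuel is never exhausted
def pvCycle : Nat → Int → Int → PySem.Set Int → PySem.Set Int
  | 0, _, _, acc => acc
  | fuel + 1, s, e, acc =>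
      let acc' := PySem.Set.add acc s
      if s ≠ e then pvCycle fuel (PySem.Int.mod (s + 1) 7) e acc' else acc'

-- _parts: recursion over the list of comma parts with the accumulator set
def pvBParts : List (List Char) → PySem.Set Int → Option (PySem.Set Int)
  | [], acc => some acc
  | p :: rest, acc =>
      let part := PySem.Chars.strip p
      if PySem.Chars.isIn ['-'] part then
        let a := part.takeWhile (· != '-')
        let b := (part.dropWhile (· != '-')).drop 1
        match pvLookup pvDayNames 0 (String.ofList (PySem.Chars.strip a)),
              pvLookup pvDayNames 0 (String.ofList (PySem.Chars.strip b)) with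
        | some s, some e => pvBParts rest (pvCycle 7 (s : Int) (e : Int) acc)
        | _, _ => none
      else
        match pvLookup pvDayNames 0 (String.ofList part) with
        | some i => pvBParts rest (PySem.Set.add acc (i : Int))
        | none => none

def parse_day_spec_py_alt (spec : String) : List Int :=
  let t := PySem.Str.strip spec
  if t = "*" then pvCycle 7 0 6 PySem.Set.empty
  else
    match pvBParts (PySem.Chars.splitOn t.toList [',']) PySem.Set.empty with
    | some r => r
    | none => []   -- Python B raises ValueError here; excluded by Pre_

-- ===== PRECONDITION & SPEC =====
-- Pre_ excludes exactly the inputs on which Python A raises ValueError: some comma part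
-- (after stripping) is neither a day name nor a 'Name-Name' range of day names.
def pvValidPart (part : List Char) : Prop :=
  let p := PySem.Chars.strip part
  if PySem.Chars.isIn ['-'] p = true then
    String.ofList (PySem.Chars.strip (p.takeWhile (· != '-'))) ∈ pvDayNames ∧
    String.ofList (PySem.Chars.strip ((p.dropWhile (· != '-')).drop 1)) ∈ pvDayNames
  else String.ofList p ∈ pvDayNames

def Pre_parse_day_spec_py (spec : String) : Prop :=
  PySem.Str.strip spec = "*" ∨
    ∀ part ∈ PySem.Chars.splitOn (PySem.Str.strip spec).toList [','], pvValidPart part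

instance (spec : String) : Decidable (Pre_parse_day_spec_py spec) := by
  unfold Pre_parse_day_spec_py pvValidPart; infer_instance

def pvWitness_parse_day_spec_py : String := "Mon, Fri-Tue"

def Spec_parse_day_spec_py (spec : String) (out : List Int) : Prop := out = parse_day_spec_py_alt spec
instance (spec : String) (out : List Int) : Decidable (Spec_parse_day_spec_py spec out) := by unfold Spec_parse_day_spec_py; infer_instance

-- ===== CLAIM (what is proved, stated in full; the proofs are below) =====
def Claim_equal_parse_day_spec_py : Prop := ∀ (spec : String), Dom_parse_day_spec_py spec → Pre_parse_day_spec_py spec → Spec_parse_day_spec_py spec (parse_day_spec_py spec)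

-- ===== LEMMAS AND PROOFS =====

lemma pvLookup_eq (s : String) :
    pvLookup pvDayNames 0 s = PySem.List.index? pvDayNames s := by
  rw [PySem.List.index?_eq_idxOf?]
  simp [pvDayNames, pvLookup, List.idxOf?, List.findIdx?_cons]
  split_ifs <;> simp_all

lemma pvIdx_lt (s : String) (i : Nat) (h : PySem.List.index? pvDayNames s = some i) : i < 7 := by
  obtain ⟨hk, -, -⟩ := PySem.List.getElem_of_index?_eq_some h
  simpa [pvDayNames] using hk

-- the list of days pvCycle visits, separated from the accumulator
def pvCycList : Nat → Int → Int → List Int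
  | 0, _, _ => []
  | fuel + 1, s, e => s :: (if s ≠ e then pvCycList fuel (PySem.Int.mod (s + 1) 7) e else [])

lemma pvCycle_foldl (fuel : Nat) (s e : Int) (acc : PySem.Set Int) :
    pvCycle fuel s e acc = PySem.Set.update acc (pvCycList fuel s e) := by
  induction fuel generalizing s acc with
  | zero => rfl
  | succ f ih =>
    simp only [pvCycle, pvCycList]
    by_cases h : s ≠ e <;> simp [h, PySem.Set.update, ih]

lemma pvCycList_eq (s e : Nat) (hs : s < 7) (he : e < 7) :
    pvCycList 7 (s : Int) (e : Int)
      = if (s : Int) ≤ (e : Int) then PySem.List.pyRange (s : Int) ((e : Int) + 1) 1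
        else PySem.List.pyRange (s : Int) 7 1 ++ PySem.List.pyRange 0 ((e : Int) + 1) 1 := by
  interval_cases s <;> interval_cases e <;> decide

lemma pvCycle_eq (s e : Nat) (hs : s < 7) (he : e < 7) (result : PySem.Set Int) :
    pvCycle 7 (s : Int) (e : Int) result
      = if (s : Int) ≤ (e : Int) then
          PySem.Set.update result (PySem.List.pyRange (s : Int) ((e : Int) + 1) 1)
        else
          PySem.Set.update (PySem.Set.update result (PySem.List.pyRange (s : Int) 7 1))
            (PySem.List.pyRange 0 ((e : Int) + 1) 1) := by
  rw [pvCycle_foldl, pvCycList_eq s e hs he]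
  split_ifs <;> simp [PySem.Set.update, List.foldl_append]

lemma pvBParts_cons (p : List Char) (rest : List (List Char)) (acc : PySem.Set Int) :
    pvBParts (p :: rest) acc
      = Option.elim (pvAPart acc p) none (fun a' => pvBParts rest a') := by
  simp only [pvBParts, pvAPart, pvLookup_eq]
  by_cases hin : PySem.Chars.isIn ['-'] (PySem.Chars.strip p) = true
  · simp only [hin, if_pos]
    rcases hA : PySem.List.index? pvDayNames
        (String.ofList (PySem.Chars.strip ((PySem.Chars.strip p).takeWhile (· != '-')))) with _ | s
    · simp
    rcases hB : PySem.List.index? pvDayNames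
        (String.ofList (PySem.Chars.strip (((PySem.Chars.strip p).dropWhile (· != '-')).drop 1))) with _ | e
    · simp
    simp only [Option.elim]
    rw [pvCycle_eq s e (pvIdx_lt _ _ hA) (pvIdx_lt _ _ hB)]
    split_ifs <;> rfl
  · rw [Bool.not_eq_true] at hin
    simp only [hin, Bool.false_eq_true, if_false]
    rcases hA : PySem.List.index? pvDayNames (String.ofList (PySem.Chars.strip p)) with _ | i
    · simp
    · simp

lemma pvFoldNone (l : List (List Char)) :
    l.foldl (fun a part => a.bind (fun r => pvAPart r part)) none = none := by
  induction l with
  | nil => rfl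
  | cons p rest ih => simpa using ih

lemma pvFold_eq (parts : List (List Char)) (acc : PySem.Set Int) :
    parts.foldl (fun a part => a.bind (fun r => pvAPart r part)) (some acc)
      = pvBParts parts acc := by
  induction parts generalizing acc with
  | nil => rfl
  | cons p rest ih =>
    rw [pvBParts_cons]
    show rest.foldl _ (pvAPart acc p) = _
    rcases h : pvAPart acc p with _ | a'
    · simp [pvFoldNone]
    · simp only [Option.elim]; exact ih a'

-- ===== VERDICT (by name: the statement is the Claim_ definition above) =====
theorem parse_day_spec_py_spec : Claim_equal_parse_day_spec_py := by
  intro spec _ _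
  unfold Spec_parse_day_spec_py parse_day_spec_py parse_day_spec_py_alt
  by_cases h : PySem.Str.strip spec = "*"
  · simp only [h, if_pos]; decide
  · simp only [h, if_false]
    rw [pvFold_eq]
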